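-- pv_equiv track=rewrite | github.com/KyubumShin/AQ | TwoPointer/2831.py | cal_pair
-- ===== SOURCE A (Python) =====
-- def cal_pair(ps, ms):
--     ps = sorted(ps)
--     ms = sorted(ms, reverse=True)
--     p_i, m_i = 0, 0
--     cnt = 0
--     while len(ps) > p_i:
--         while len(ms) > m_i:
--             if ps[p_i] + ms[m_i] < 0:
--                 m_i += 1
--                 cnt += 1
--                 break
--             else:
--                 m_i += 1
--         if m_i == len(ms):
--             break
--         p_i += 1
--     return cnt
-- ===== SOURCE B (Python) =====
-- def cal_pair(ps, ms):
--     P = sorted(ps)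
--     M = sorted(ms)
--
--     def ok(k):
--         # can the k smallest of P be cross-paired with the k smallest of M?
--         return all(P[i] + M[k - 1 - i] < 0 for i in range(k))
--
--     lo, hi = 0, min(len(P), len(M))
--     while lo < hi:
--         mid = (lo + hi + 1) // 2
--         if ok(mid):
--             lo = mid
--         else:
--             hi = mid - 1
--     return lo
-- ===== Notes on version B (the rewrite author's own statement) =====
-- stated objective: alternative
-- what changed: Replaces A's greedy nested-scan matching by a binary search on the answer k, using the monotone feasibility predicate 'the k smallest ps cross-paired with the k smallest ms all sum below zero'.
import Mathlib
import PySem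

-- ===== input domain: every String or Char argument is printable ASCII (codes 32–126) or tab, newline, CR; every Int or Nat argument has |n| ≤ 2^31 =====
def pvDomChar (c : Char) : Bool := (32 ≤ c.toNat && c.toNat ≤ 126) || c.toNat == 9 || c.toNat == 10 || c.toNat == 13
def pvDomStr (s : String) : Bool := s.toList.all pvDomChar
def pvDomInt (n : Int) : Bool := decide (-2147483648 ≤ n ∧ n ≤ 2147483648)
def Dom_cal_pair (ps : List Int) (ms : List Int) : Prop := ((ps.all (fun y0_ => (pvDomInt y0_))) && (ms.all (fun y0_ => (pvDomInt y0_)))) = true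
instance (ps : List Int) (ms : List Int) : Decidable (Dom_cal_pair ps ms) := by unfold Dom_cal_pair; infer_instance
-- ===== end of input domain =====

-- B replaces A's greedy nested-scan matching by a binary search on the answer k over a monotone
-- cross-pairing feasibility predicate; same count, proved via a max-matching characterization (pvH).


-- ===== PORT A =====
-- inner `while len(ms) > m_i` loop: returns the new m_i and whether it broke after counting a pair
def calPairInner (ms : List Int) (p : Int) (m_i : Nat) : Nat × Bool :=
  if h : ms.length > m_i then
    if p + ms.getD m_i 0 < 0 then (m_i + 1, true)
    else calPairInner ms p (m_i + 1)
  else (m_i, false)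
termination_by ms.length - m_i
decreasing_by omega

-- outer `while len(ps) > p_i` loop
def calPairOuter (ps ms : List Int) (p_i m_i : Nat) (cnt : Int) : Int :=
  if h : ps.length > p_i then
    let r := calPairInner ms (ps.getD p_i 0) m_i
    let cnt' := if r.2 then cnt + 1 else cnt
    if r.1 = ms.length then cnt'
    else calPairOuter ps ms (p_i + 1) r.1 cnt'
  else cnt
termination_by ps.length - p_i
decreasing_by omega

def cal_pair (ps : List Int) (ms : List Int) : Int :=
  calPairOuter (PySem.List.sorted ps (fun x => x) false)
               (PySem.List.sorted ms (fun x => x) true) 0 0 0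

-- ===== PORT B =====
-- ok(k): can the k smallest of P be cross-paired with the k smallest of M?
def bsOk (P M : List Int) (k : Nat) : Bool :=
  (List.range k).all (fun i => decide (P.getD i 0 + M.getD (k - 1 - i) 0 < 0))

-- binary search `while lo < hi` loop
def bsLoop (P M : List Int) (lo hi : Nat) : Nat :=
  if h : lo < hi then
    if bsOk P M ((lo + hi + 1) / 2) then bsLoop P M ((lo + hi + 1) / 2) hi
    else bsLoop P M lo ((lo + hi + 1) / 2 - 1)
  else lo
termination_by hi - lo
decreasing_by
  · omega
  · omega

def cal_pair_alt (ps : List Int) (ms : List Int) : Int :=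
  (bsLoop (PySem.List.sorted ps (fun x => x) false)
          (PySem.List.sorted ms (fun x => x) false)
          0
          (min (PySem.List.sorted ps (fun x => x) false).length
               (PySem.List.sorted ms (fun x => x) false).length) : Nat)

-- ===== PRECONDITION & SPEC =====
def Spec_cal_pair (ps : List Int) (ms : List Int) (out : Int) : Prop := out = cal_pair_alt ps ms
instance (ps : List Int) (ms : List Int) (out : Int) : Decidable (Spec_cal_pair ps ms out) := by unfold Spec_cal_pair; infer_instance

-- ===== CLAIM (what is proved, stated in full; the proofs are below) =====
def Claim_equal_cal_pair : Prop := ∀ (ps : List Int) (ms : List Int), Dom_cal_pair ps ms → Spec_cal_pair ps ms (cal_pair ps ms)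

-- ===== LEMMAS AND PROOFS =====

-- A's loop, list form: pair the head p with the first usable m of the (descending) list M
def pvAux : List Int → List Int → Int
  | [], _ => 0
  | p :: P, M =>
    match M.dropWhile (fun m => !decide (p + m < 0)) with
    | [] => 0
    | _ :: rest => 1 + pvAux P rest

-- the common greedy on ASCENDING second list: pair head p with the largest usable m
def pvH : List Int → List Int → Nat
  | [], _ => 0
  | p :: P, N =>
    if (N.takeWhile (fun m => decide (p + m < 0))).isEmpty then 0
    else 1 + pvH P (N.takeWhile (fun m => decide (p + m < 0))).dropLast

-- "k pairs are simultaneously realizable": k smallest of P cross-paired with k smallest of N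
def pvFeas (P N : List Int) (k : Nat) : Prop :=
  k ≤ P.length ∧ k ≤ N.length ∧ ∀ i < k, P.getD i 0 + N.getD (k - 1 - i) 0 < 0

theorem pvSortedAsc (xs : List Int) : (PySem.List.sorted xs (fun x => x) false).Pairwise (· ≤ ·) := by
  have := PySem.List.sorted_pairwise (xs := xs) (key := fun x : Int => x)
  simpa using this

theorem pvSortedRev (xs : List Int) :
    PySem.List.sorted xs (fun x => x) true = (PySem.List.sorted xs (fun x => x) false).reverse := by
  have hperm : (PySem.List.sorted xs (fun x => x) true).Perm ((PySem.List.sorted xs (fun x => x) false).reverse) :=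
    (PySem.List.sorted_perm ..).trans ((List.reverse_perm _).trans (PySem.List.sorted_perm ..)).symm
  have h1 : (PySem.List.sorted xs (fun x => x) true).Pairwise (fun a b : Int => b ≤ a) := by
    have := PySem.List.sorted_pairwise_rev (xs := xs) (key := fun x : Int => x)
    simpa using this
  have h2 : ((PySem.List.sorted xs (fun x => x) false).reverse).Pairwise (fun a b : Int => b ≤ a) := by
    rw [List.pairwise_reverse]
    exact pvSortedAsc xs
  exact hperm.eq_of_pairwise (fun a b _ _ hab hba => le_antisymm hba hab) h1 h2

theorem pvGetD_prefix {l₁ l₂ : List Int} (h : l₁ <+: l₂) {i : Nat} (hi : i < l₁.length) :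
    l₁.getD i 0 = l₂.getD i 0 := by
  rw [List.getD_eq_getElem _ _ hi, List.getD_eq_getElem _ _ (hi.trans_le h.length_le)]
  exact h.getElem hi

theorem pvTakeWhile_getD {N : List Int} {pr : Int → Bool} {i : Nat}
    (hi : i < (N.takeWhile pr).length) : pr (N.getD i 0) = true := by
  have h1 : (N.takeWhile pr).getD i 0 = N.getD i 0 := pvGetD_prefix (List.takeWhile_prefix pr) hi
  rw [← h1, List.getD_eq_getElem _ _ hi]
  exact List.mem_takeWhile_imp (List.getElem_mem hi)

theorem pvTakeWhile_bound {N : List Int} {pr : Int → Bool}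
    (hmono : ∀ a b : Int, a ≤ b → pr b = true → pr a = true)
    (hN : N.Pairwise (· ≤ ·)) {i : Nat}
    (hc : (N.takeWhile pr).length ≤ i) (hi : i < N.length) : pr (N.getD i 0) = false := by
  have hsplit : N.takeWhile pr ++ N.dropWhile pr = N := List.takeWhile_append_dropWhile
  have hlen : (N.takeWhile pr).length + (N.dropWhile pr).length = N.length := by
    rw [← List.length_append, hsplit]
  have hDne : N.dropWhile pr ≠ [] := by
    intro h; rw [h] at hlen; simp at hlen; omega
  have hhead : pr ((N.dropWhile pr).head hDne) = false := List.head_dropWhile_not pr hDne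
  have hgen : ∀ (K D : List Int) (hD : D ≠ []), (K ++ D).getD K.length 0 = D.head hD := by
    intro K D hD
    obtain ⟨d, t, rfl⟩ := List.exists_cons_of_ne_nil hD
    rw [List.getD_eq_getElem _ _ (by simp)]
    rw [List.getElem_append_right (le_refl K.length)]
    simp
  have hc0 : N.getD (N.takeWhile pr).length 0 = (N.dropWhile pr).head hDne := by
    have := hgen (N.takeWhile pr) (N.dropWhile pr) hDne
    rw [hsplit] at this
    exact this
  have hmonoN : N.getD (N.takeWhile pr).length 0 ≤ N.getD i 0 := by
    rcases eq_or_lt_of_le hc with heq | hlt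
    · rw [heq]
    · rw [List.getD_eq_getElem _ _ (by omega), List.getD_eq_getElem _ _ hi]
      exact List.pairwise_iff_getElem.mp hN _ _ (by omega) hi hlt
  cases h : pr (N.getD i 0) with
  | false => rfl
  | true =>
    have := hmono _ _ hmonoN h
    rw [hc0] at this
    rw [this] at hhead
    exact absurd hhead (by decide)

theorem pvDropWhile_reverse {N : List Int} {pr : Int → Bool}
    (hmono : ∀ a b : Int, a ≤ b → pr b = true → pr a = true)
    (hN : N.Pairwise (· ≤ ·)) :
    N.reverse.dropWhile (fun m => !pr m) = (N.takeWhile pr).reverse := by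
  have hsplit : N.takeWhile pr ++ N.dropWhile pr = N := List.takeWhile_append_dropWhile
  have hDall : ∀ x ∈ N.dropWhile pr, (!pr x) = true := by
    intro x hx
    have hDne : N.dropWhile pr ≠ [] := List.ne_nil_of_mem hx
    have hhead : pr ((N.dropWhile pr).head hDne) = false := List.head_dropWhile_not pr hDne
    have hDpair : (N.dropWhile pr).Pairwise (· ≤ ·) := hN.sublist (List.dropWhile_sublist pr)
    obtain ⟨d, t, hDeq⟩ := List.exists_cons_of_ne_nil hDne
    rw [hDeq] at hx hDpair
    simp only [hDeq, List.head_cons] at hhead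
    rcases List.mem_cons.mp hx with rfl | hxt
    · simp [hhead]
    · have hdx : d ≤ x := List.rel_of_pairwise_cons hDpair hxt
      cases hpx : pr x with
      | false => simp
      | true =>
        have := hmono d x hdx hpx
        rw [this] at hhead
        exact absurd hhead (by decide)
  have hKstop : (N.takeWhile pr).reverse.dropWhile (fun m => !pr m) = (N.takeWhile pr).reverse := by
    rcases eq_or_ne (N.takeWhile pr) [] with hnil | hne
    · simp [hnil]
    · obtain ⟨a, t, h⟩ : ∃ a t, (N.takeWhile pr).reverse = a :: t :=
        List.exists_cons_of_ne_nil (by simpa using hne)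
      have ha : a ∈ N.takeWhile pr := by
        have : a ∈ (N.takeWhile pr).reverse := by rw [h]; exact List.mem_cons_self
        simpa using this
      rw [h, List.dropWhile_cons_of_neg (by simp [List.mem_takeWhile_imp ha])]
  conv_lhs => rw [← hsplit]
  rw [List.reverse_append, List.dropWhile_append]
  have h1 : ((N.dropWhile pr).reverse.dropWhile fun m => !pr m) = [] := by
    rw [List.dropWhile_eq_nil_iff]
    intro x hx
    exact hDall x (List.mem_reverse.mp hx)
  rw [h1]
  simpa using hKstop

theorem pvAux_nil (P : List Int) : pvAux P [] = 0 := by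
  cases P <;> simp [pvAux]

theorem pvH_cons {p : Int} (P N : List Int) (hKne : N.takeWhile (fun m => decide (p + m < 0)) ≠ []) :
    pvH (p :: P) N = pvH P ((N.takeWhile (fun m => decide (p + m < 0))).dropLast) + 1 := by
  rw [pvH, if_neg (by simpa [List.isEmpty_iff] using hKne)]
  omega

theorem pvH_cons_nil {p : Int} (P N : List Int) (hKnil : N.takeWhile (fun m => decide (p + m < 0)) = []) :
    pvH (p :: P) N = 0 := by
  rw [pvH, if_pos (by simp [hKnil])]

theorem pvAux_reverse (P : List Int) : ∀ N : List Int, N.Pairwise (· ≤ ·) →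
    pvAux P N.reverse = (pvH P N : Int) := by
  induction P with
  | nil => intro N _; simp [pvAux, pvH]
  | cons p P ih =>
    intro N hN
    have hmono : ∀ a b : Int, a ≤ b → (decide (p + b < 0)) = true → (decide (p + a < 0)) = true := by
      intro a b hab h; simp at h ⊢; omega
    have hdw := pvDropWhile_reverse (pr := fun m => decide (p + m < 0)) hmono hN
    rcases eq_or_ne (N.takeWhile (fun m => decide (p + m < 0))) [] with hKnil | hKne
    · rw [pvH_cons_nil P N hKnil]
      simp [pvAux, hdw, hKnil]
    · have hKsplit := List.dropLast_append_getLast hKne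
      have hKrev : (N.takeWhile (fun m => decide (p + m < 0))).reverse
          = (N.takeWhile (fun m => decide (p + m < 0))).getLast hKne
            :: (N.takeWhile (fun m => decide (p + m < 0))).dropLast.reverse := by
        conv_lhs => rw [← hKsplit]
        simp
      have hKpair : (N.takeWhile (fun m => decide (p + m < 0))).dropLast.Pairwise (· ≤ ·) :=
        hN.sublist ((List.dropLast_sublist _).trans (List.takeWhile_sublist _))
      have hrec := ih _ hKpair
      calc pvAux (p :: P) N.reverse
          = 1 + pvAux P (N.takeWhile (fun m => decide (p + m < 0))).dropLast.reverse := by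
            simp only [pvAux, hdw, hKrev]
        _ = ((pvH (p :: P) N : Nat) : Int) := by
            rw [hrec, pvH_cons P N hKne]
            push_cast
            ring

theorem pvFeas_pvH : ∀ (P N : List Int), N.Pairwise (· ≤ ·) → pvFeas P N (pvH P N) := by
  intro P
  induction P with
  | nil => intro N _; exact ⟨by simp [pvH], by simp [pvH], by intro i hi; simp [pvH] at hi⟩
  | cons p P ih =>
    intro N hN
    have hKlen : (N.takeWhile (fun m => decide (p + m < 0))).length ≤ N.length :=
      (List.takeWhile_sublist _).length_le
    rcases eq_or_ne (N.takeWhile (fun m => decide (p + m < 0))) [] with hKnil | hKne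
    · rw [pvH_cons_nil P N hKnil]
      exact ⟨by omega, by omega, by intro i hi; omega⟩
    · have hKpos : 0 < (N.takeWhile (fun m => decide (p + m < 0))).length :=
        List.length_pos_of_ne_nil hKne
      have hKpair : (N.takeWhile (fun m => decide (p + m < 0))).dropLast.Pairwise (· ≤ ·) :=
        hN.sublist ((List.dropLast_sublist _).trans (List.takeWhile_sublist _))
      obtain ⟨hf1, hf2, hf3⟩ := ih _ hKpair
      have hdl : (N.takeWhile (fun m => decide (p + m < 0))).dropLast.length
          = (N.takeWhile (fun m => decide (p + m < 0))).length - 1 := List.length_dropLast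
      rw [pvH_cons P N hKne]
      refine ⟨by simp only [List.length_cons]; omega, by omega, ?_⟩
      intro i hi
      rcases Nat.eq_zero_or_pos i with rfl | hipos
      · have hlt : pvH P (N.takeWhile (fun m => decide (p + m < 0))).dropLast
            < (N.takeWhile (fun m => decide (p + m < 0))).length := by omega
        have hg := pvTakeWhile_getD (N := N) (pr := fun m => decide (p + m < 0)) hlt
        simp only [decide_eq_true_eq] at hg
        simp only [List.getD_cons_zero]
        have hidx0 : pvH P (N.takeWhile (fun m => decide (p + m < 0))).dropLast + 1 - 1 - 0
            = pvH P (N.takeWhile (fun m => decide (p + m < 0))).dropLast := by omega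
        rw [hidx0]
        exact hg
      · obtain ⟨j, rfl⟩ : ∃ j, i = j + 1 := ⟨i - 1, by omega⟩
        have hji : j < pvH P (N.takeWhile (fun m => decide (p + m < 0))).dropLast := by omega
        have hval := hf3 j hji
        have hidx : (pvH P (N.takeWhile (fun m => decide (p + m < 0))).dropLast + 1) - 1 - (j + 1)
            = pvH P (N.takeWhile (fun m => decide (p + m < 0))).dropLast - 1 - j := by omega
        have hpre : (N.takeWhile (fun m => decide (p + m < 0))).dropLast.getD
              (pvH P (N.takeWhile (fun m => decide (p + m < 0))).dropLast - 1 - j) 0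
            = N.getD (pvH P (N.takeWhile (fun m => decide (p + m < 0))).dropLast - 1 - j) 0 := by
          apply pvGetD_prefix ((List.dropLast_prefix _).trans (List.takeWhile_prefix _))
          omega
        simp only [List.getD_cons_succ]
        rw [hidx, ← hpre]
        exact hval

theorem pvFeas_le_pvH : ∀ (P N : List Int) (k : Nat), N.Pairwise (· ≤ ·) → pvFeas P N k → k ≤ pvH P N := by
  intro P
  induction P with
  | nil =>
    intro N k _ hf
    have h1 := hf.1
    simp only [List.length_nil] at h1
    simp [pvH]
    omega
  | cons p P ih =>
    intro N k hN hf
    obtain ⟨hf1, hf2, hf3⟩ := hf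
    rcases Nat.eq_zero_or_pos k with rfl | hk
    · omega
    obtain ⟨k', rfl⟩ : ∃ k', k = k' + 1 := ⟨k - 1, by omega⟩
    have hmono : ∀ a b : Int, a ≤ b → (decide (p + b < 0)) = true → (decide (p + a < 0)) = true := by
      intro a b hab h; simp at h ⊢; omega
    have h0 := hf3 0 (by omega)
    simp only [List.getD_cons_zero] at h0
    have hidx0 : k' + 1 - 1 - 0 = k' := by omega
    rw [hidx0] at h0
    have hkK : k' < (N.takeWhile (fun m => decide (p + m < 0))).length := by
      by_contra hge
      have hb := pvTakeWhile_bound (pr := fun m => decide (p + m < 0)) hmono hN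
        (i := k') (by omega) (by omega)
      simp only [decide_eq_false_iff_not] at hb
      omega
    have hKne : (N.takeWhile (fun m => decide (p + m < 0))) ≠ [] := by
      intro h; rw [h] at hkK; simp at hkK
    have hKpair : (N.takeWhile (fun m => decide (p + m < 0))).dropLast.Pairwise (· ≤ ·) :=
      hN.sublist ((List.dropLast_sublist _).trans (List.takeWhile_sublist _))
    have hdl : (N.takeWhile (fun m => decide (p + m < 0))).dropLast.length
        = (N.takeWhile (fun m => decide (p + m < 0))).length - 1 := List.length_dropLast
    have hfeas' : pvFeas P (N.takeWhile (fun m => decide (p + m < 0))).dropLast k' := by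
      refine ⟨by simp only [List.length_cons] at hf1; omega, by omega, ?_⟩
      intro i hi
      have hval := hf3 (i + 1) (by omega)
      simp only [List.getD_cons_succ] at hval
      have hidx : (k' + 1) - 1 - (i + 1) = k' - 1 - i := by omega
      rw [hidx] at hval
      have hpre : (N.takeWhile (fun m => decide (p + m < 0))).dropLast.getD (k' - 1 - i) 0
          = N.getD (k' - 1 - i) 0 := by
        apply pvGetD_prefix ((List.dropLast_prefix _).trans (List.takeWhile_prefix _))
        omega
      rw [hpre]
      exact hval
    have hrec := ih _ k' hKpair hfeas'
    have hpvH := pvH_cons (p := p) P N hKne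
    omega

-- sorted getD monotone
theorem pvGetD_mono {N : List Int} (hN : N.Pairwise (· ≤ ·)) {a b : Nat}
    (hab : a ≤ b) (hb : b < N.length) : N.getD a 0 ≤ N.getD b 0 := by
  rcases eq_or_lt_of_le hab with rfl | hlt
  · exact le_refl _
  · rw [List.getD_eq_getElem _ _ (by omega), List.getD_eq_getElem _ _ hb]
    exact List.pairwise_iff_getElem.mp hN _ _ (by omega) hb hlt

-- feasibility is downward closed (N sorted ascending)
theorem pvFeas_mono {P N : List Int} (hN : N.Pairwise (· ≤ ·)) {j k : Nat}
    (hjk : j ≤ k) (hf : pvFeas P N k) : pvFeas P N j := by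
  obtain ⟨h1, h2, h3⟩ := hf
  refine ⟨by omega, by omega, fun i hi => ?_⟩
  have hk := h3 i (by omega)
  have hle : N.getD (j - 1 - i) 0 ≤ N.getD (k - 1 - i) 0 :=
    pvGetD_mono hN (by omega) (by omega)
  omega

-- bsOk coincides with feasibility (given the length bounds)
theorem pvBsOk_iff {P M : List Int} {k : Nat} (hP : k ≤ P.length) (hM : k ≤ M.length) :
    bsOk P M k = true ↔ pvFeas P M k := by
  unfold bsOk pvFeas
  rw [List.all_eq_true]
  constructor
  · intro h
    refine ⟨hP, hM, fun i hi => ?_⟩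
    have := h i (List.mem_range.mpr hi)
    simpa using this
  · intro h i hi
    have := h.2.2 i (List.mem_range.mp hi)
    simpa using this

-- the binary search converges to pvH
theorem pvBsLoop_eq {P M : List Int} (hM : M.Pairwise (· ≤ ·)) :
    ∀ (n lo hi : Nat), hi - lo ≤ n → lo ≤ pvH P M → pvH P M ≤ hi →
      hi ≤ min P.length M.length → bsLoop P M lo hi = pvH P M := by
  intro n
  induction n with
  | zero =>
    intro lo hi hn hlo hhi _
    rw [bsLoop, dif_neg (by omega)]
    omega
  | succ n ih =>
    intro lo hi hn hlo hhi hb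
    by_cases hlt : lo < hi
    · rw [bsLoop, dif_pos hlt]
      have hmid1 : lo < (lo + hi + 1) / 2 := by omega
      have hmid2 : (lo + hi + 1) / 2 ≤ hi := by omega
      by_cases hok : bsOk P M ((lo + hi + 1) / 2) = true
      · rw [if_pos hok]
        have hfeas : pvFeas P M ((lo + hi + 1) / 2) :=
          (pvBsOk_iff (by omega) (by omega)).mp hok
        have hle : (lo + hi + 1) / 2 ≤ pvH P M := pvFeas_le_pvH P M _ hM hfeas
        exact ih _ hi (by omega) hle hhi hb
      · rw [if_neg hok]
        have hgt : pvH P M < (lo + hi + 1) / 2 := by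
          by_contra hge
          have hfeas : pvFeas P M ((lo + hi + 1) / 2) :=
            pvFeas_mono hM (by omega) (pvFeas_pvH P M hM)
          exact hok ((pvBsOk_iff (by omega) (by omega)).mpr hfeas)
        exact ih lo _ (by omega) hlo (by omega) (by omega)
    · rw [bsLoop, dif_neg hlt]
      omega

theorem pvInner_eq (ms : List Int) (p : Int) : ∀ m_i : Nat, m_i ≤ ms.length →
    calPairInner ms p m_i =
      (ms.length - ((ms.drop m_i).dropWhile (fun m => !decide (p + m < 0))).length +
         (if ((ms.drop m_i).dropWhile (fun m => !decide (p + m < 0))).isEmpty then 0 else 1),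
       !((ms.drop m_i).dropWhile (fun m => !decide (p + m < 0))).isEmpty) := by
  suffices H : ∀ (n m_i : Nat), ms.length - m_i = n → m_i ≤ ms.length →
      calPairInner ms p m_i =
        (ms.length - ((ms.drop m_i).dropWhile (fun m => !decide (p + m < 0))).length +
           (if ((ms.drop m_i).dropWhile (fun m => !decide (p + m < 0))).isEmpty then 0 else 1),
         !((ms.drop m_i).dropWhile (fun m => !decide (p + m < 0))).isEmpty) by
    intro m_i hle
    exact H (ms.length - m_i) m_i rfl hle
  intro n
  induction n with
  | zero =>
    intro m_i hn hle
    have hmi : m_i = ms.length := by omega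
    rw [calPairInner]
    rw [dif_neg (by omega)]
    rw [hmi, List.drop_length]
    simp
  | succ n ih =>
    intro m_i hn hle
    have hlt : m_i < ms.length := by omega
    rw [calPairInner]
    rw [dif_pos (by omega)]
    rw [List.drop_eq_getElem_cons hlt]
    by_cases hc : p + ms.getD m_i 0 < 0
    · rw [if_pos hc]
      rw [List.getD_eq_getElem _ _ hlt] at hc
      have hd : ((ms[m_i] :: ms.drop (m_i + 1)).dropWhile fun m => !decide (p + m < 0))
          = ms[m_i] :: ms.drop (m_i + 1) :=
        List.dropWhile_cons_of_neg (by simp [hc])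
      rw [hd, Prod.mk.injEq]
      refine ⟨?_, by rw [List.isEmpty_cons]; rfl⟩
      rw [List.isEmpty_cons, if_neg (by decide)]
      rw [List.length_cons, List.length_drop]
      omega
    · rw [if_neg hc]
      rw [List.getD_eq_getElem _ _ hlt] at hc
      have hd : ((ms[m_i] :: ms.drop (m_i + 1)).dropWhile fun m => !decide (p + m < 0))
          = ((ms.drop (m_i + 1)).dropWhile fun m => !decide (p + m < 0)) :=
        List.dropWhile_cons_of_pos (by simp [hc])
      rw [hd]
      exact ih (m_i + 1) (by omega) (by omega)

theorem pvOuter_eq (ps ms : List Int) : ∀ (p_i m_i : Nat) (cnt : Int), m_i ≤ ms.length →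
    calPairOuter ps ms p_i m_i cnt = cnt + pvAux (ps.drop p_i) (ms.drop m_i) := by
  suffices H : ∀ (n p_i m_i : Nat) (cnt : Int), ps.length - p_i = n → m_i ≤ ms.length →
      calPairOuter ps ms p_i m_i cnt = cnt + pvAux (ps.drop p_i) (ms.drop m_i) by
    intro p_i m_i cnt hle
    exact H (ps.length - p_i) p_i m_i cnt rfl hle
  intro n
  induction n with
  | zero =>
    intro p_i m_i cnt hn hle
    have hpi : ps.length ≤ p_i := by omega
    rw [calPairOuter, dif_neg (by omega)]
    rw [List.drop_eq_nil_of_le hpi]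
    simp [pvAux]
  | succ n ih =>
    intro p_i m_i cnt hn hle
    have hlt : p_i < ps.length := by omega
    rw [calPairOuter, dif_pos (by omega)]
    rw [pvInner_eq ms (ps.getD p_i 0) m_i hle]
    have hdropP : ps.drop p_i = ps.getD p_i 0 :: ps.drop (p_i + 1) := by
      rw [List.drop_eq_getElem_cons hlt, List.getD_eq_getElem _ _ hlt]
    rcases hD : ((ms.drop m_i).dropWhile fun m => !decide (ps.getD p_i 0 + m < 0)) with _ | ⟨d, rest⟩
    · rw [hdropP]
      simp [pvAux, hD, -List.getD_eq_getElem?_getD]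
    · have hsuff : (d :: rest) <:+ ms := hD ▸ ((List.dropWhile_suffix _).trans (List.drop_suffix _ _))
      have hDlen : (d :: rest).length ≤ ms.length := hsuff.length_le
      simp only [List.length_cons] at hDlen
      have hdropD : ms.drop (ms.length - (d :: rest).length) = d :: rest := by
        obtain ⟨t, ht⟩ := hsuff
        have hlen2 := congrArg List.length ht
        rw [List.length_append] at hlen2
        have hlt2 : t.length = ms.length - (d :: rest).length := by omega
        rw [← hlt2, ← ht, List.drop_left]
      have hrest : ms.drop (ms.length - (d :: rest).length + 1) = rest := by
        rw [← List.tail_drop, hdropD]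
        rfl
      simp only [List.length_cons] at hrest
      rcases eq_or_ne rest [] with rfl | hrne
      · have h1 : ms.length - 1 + 1 = ms.length := by simp at hDlen; omega
        rw [hdropP]
        simp [pvAux, hD, pvAux_nil, h1, -List.getD_eq_getElem?_getD]
      · have hrpos : 0 < rest.length := List.length_pos_of_ne_nil hrne
        have h2 : ¬(ms.length - (rest.length + 1) + 1 = ms.length) := by omega
        rw [hdropP]
        simp [pvAux, hD, h2, -List.getD_eq_getElem?_getD]
        rw [ih (p_i + 1) _ (cnt + 1) (by omega) (by omega)]
        rw [hrest]
        ring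

-- ===== VERDICT (by name: the statement is the Claim_ definition above) =====
theorem cal_pair_spec : Claim_equal_cal_pair := by
  intro ps ms _
  unfold Spec_cal_pair cal_pair cal_pair_alt
  rw [pvSortedRev ms]
  rw [pvOuter_eq _ _ 0 0 0 (by omega)]
  simp only [List.drop_zero]
  rw [pvAux_reverse _ _ (pvSortedAsc ms)]
  have hfeas := pvFeas_pvH (PySem.List.sorted ps (fun x => x) false)
    (PySem.List.sorted ms (fun x => x) false) (pvSortedAsc ms)
  rw [pvBsLoop_eq (pvSortedAsc ms) _ 0 _ (le_refl _) (by omega)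
    (le_min hfeas.1 hfeas.2.1) (le_refl _)]
  omega
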